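-- pv_equiv track=rewrite | github.com/scotthirebloom/competitor-tracker | tracker/reporter.py | _chunk_at_dividers
-- ===== SOURCE A (Python) =====
-- def _chunk_at_dividers(blocks: list[dict], max_size: int) -> list[list[dict]]:
--     """Split a flat block list into groups of at most max_size.
--
--     Splits only at divider boundaries so competitor sections are never broken
--     across messages. Falls back to a hard split if no divider is found in range
--     (shouldn't happen with normal reporter output).
--     """
--     if len(blocks) <= max_size:
--         return [blocks]
--
--     divider_positions = [i for i, b in enumerate(blocks) if b["type"] == "divider"]
--
--     chunks: list[list[dict]] = []
--     start = 0
--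
--     while start < len(blocks):
--         end = start + max_size
--         if end >= len(blocks):
--             chunks.append(blocks[start:])
--             break
--
--         # Find the last divider that falls within [start+1, end] and split after it
--         split_at = None
--         for pos in reversed(divider_positions):
--             if start < pos <= end:
--                 split_at = pos + 1  # include the divider in this chunk
--                 break
--
--         if split_at is None:
--             split_at = end  # hard split — no divider in range
--
--         chunks.append(blocks[start:split_at])
--         start = split_at
--
--     return chunks
-- ===== SOURCE B (Python) =====
-- def _chunk_at_dividers(blocks: list[dict], max_size: int) -> list[list[dict]]:
--     """Split a flat block list into groups of at most max_size, cutting only at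
--     divider boundaries (hard split when no divider is in range).
--
--     Different plan from A's per-chunk reverse linear scan: compute the list of
--     cut positions first, locating the last divider in range with a hand-written
--     bisect_right (binary search; A imports no modules, so B hand-writes it)
--     over the sorted divider positions, then slice blocks at consecutive cuts.
--     """
--     n = len(blocks)
--     if n <= max_size:
--         return [blocks]
--
--     divs = [i for i, b in enumerate(blocks) if b["type"] == "divider"]
--
--     def _bisect_right(a, x):
--         lo, hi = 0, len(a)
--         while lo < hi:
--             mid = (lo + hi) // 2
--             if a[mid] <= x:
--                 lo = mid + 1
--             else:
--                 hi = mid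
--         return lo
--
--     cuts = [0]
--     s = 0
--     while n - s > max_size:
--         j = _bisect_right(divs, s + max_size)
--         p = divs[j - 1] if j > 0 else -1
--         s = p + 1 if p > s else s + max_size
--         cuts.append(s)
--     if s < n:
--         cuts.append(n)
--     return [blocks[a:b] for a, b in zip(cuts, cuts[1:])]
-- ===== Notes on version B (the rewrite author's own statement) =====
-- stated objective: alternative
-- what changed: B first computes the list of cut positions, finding the last in-range divider per chunk by a hand-written bisect_right (binary search) over the sorted divider positions instead of A's reverse linear scan of the whole divider list, then slices the block list at consecutive cut pairs.
-- outside the precondition, e.g. on _chunk_at_dividers([], -1): A returns [], B does not finish within the time limit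
import Mathlib
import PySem

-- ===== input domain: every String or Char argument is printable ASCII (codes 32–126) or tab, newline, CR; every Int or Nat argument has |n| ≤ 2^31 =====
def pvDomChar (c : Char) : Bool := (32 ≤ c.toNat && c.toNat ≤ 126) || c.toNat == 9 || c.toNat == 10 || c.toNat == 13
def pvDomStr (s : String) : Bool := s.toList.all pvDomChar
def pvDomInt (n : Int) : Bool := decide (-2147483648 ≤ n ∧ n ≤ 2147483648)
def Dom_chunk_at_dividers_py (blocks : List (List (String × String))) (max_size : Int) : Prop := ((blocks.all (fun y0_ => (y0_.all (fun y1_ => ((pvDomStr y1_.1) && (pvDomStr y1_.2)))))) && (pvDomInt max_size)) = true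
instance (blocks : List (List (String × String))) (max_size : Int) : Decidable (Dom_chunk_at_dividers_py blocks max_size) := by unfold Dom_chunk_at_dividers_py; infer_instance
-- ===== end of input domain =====

-- B computes the cut positions first (binary search over the sorted divider positions per chunk,
-- instead of A's reverse linear scan) and then slices at consecutive cuts; return values agree on Pre_.

-- ===== PORT A =====

-- b["type"] (assoc-list dict, first match); Pre_ guarantees the key is present where A evaluates it
def pvTypeOf (b : List (String × String)) : Option String :=
  (b.find? (fun p => p.1 == "type")).map (·.2)

-- `for pos in reversed(divider_positions): if start < pos <= end: split_at = pos + 1; break`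
def pvAFind (rds : List Int) (start e : Int) : Option Int :=
  match rds with
  | [] => none
  | p :: rest => if start < p ∧ p ≤ e then some (p + 1) else pvAFind rest start e

-- A's while loop, fuel = blocks.length + 1 (enough: start strictly increases each iteration)
def pvALoop (blocks : List (List (String × String))) (divs : List Int) (m : Int) :
    Nat → Int → List (List (List (String × String))) → List (List (List (String × String)))
  | 0, _, chunks => chunks
  | fuel + 1, start, chunks =>
    if start < (blocks.length : Int) then
      let e := start + m
      if (blocks.length : Int) ≤ e then
        chunks ++ [PySem.List.slice blocks (some start) none]
      else
        let split := match pvAFind divs.reverse start (start + m) with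
          | some v => v
          | none => start + m
        pvALoop blocks divs m fuel split (chunks ++ [PySem.List.slice blocks (some start) (some split)])
    else chunks

def chunk_at_dividers_py (blocks : List (List (String × String))) (max_size : Int) : List (List (List (String × String))) :=
  if (blocks.length : Int) ≤ max_size then [blocks]
  else
    let divs := ((PySem.List.enumerate blocks 0).filter (fun ib => pvTypeOf ib.2 == some "divider")).map (·.1)
    pvALoop blocks divs max_size (blocks.length + 1) 0 []

-- ===== PORT B =====

-- B's hand-written bisect_right (binary search; a[mid] is in range whenever read, hence the .getD 0)
def pvBr (a : List Int) (x : Int) : Nat → Int → Int → Int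
  | 0, lo, _ => lo
  | fuel + 1, lo, hi =>
    if lo < hi then
      let mid := PySem.Int.floordiv (lo + hi) 2
      if (PySem.List.pyGet? a mid).getD 0 ≤ x then pvBr a x fuel (mid + 1) hi
      else pvBr a x fuel lo mid
    else lo

-- B's cut-position loop: `while n - s > max_size: …; if s < n: cuts.append(n)`;
-- fuel = blocks.length + 1 (enough: s strictly increases each iteration)
def pvCuts (n m : Int) (divs : List Int) : Nat → Int → List Int → List Int
  | 0, _, cuts => cuts
  | fuel + 1, s, cuts =>
    if m < n - s then
      let j := pvBr divs (s + m) (divs.length + 1) 0 (divs.length : Int)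
      let p := if 0 < j then (PySem.List.pyGet? divs (j - 1)).getD (-1) else -1
      let s' := if s < p then p + 1 else s + m
      pvCuts n m divs fuel s' (cuts ++ [s'])
    else if s < n then cuts ++ [n] else cuts

def chunk_at_dividers_py_alt (blocks : List (List (String × String))) (max_size : Int) : List (List (List (String × String))) :=
  if (blocks.length : Int) ≤ max_size then [blocks]
  else
    let divs := ((PySem.List.enumerate blocks 0).filter (fun ib => pvTypeOf ib.2 == some "divider")).map (·.1)
    let cuts := pvCuts (blocks.length : Int) max_size divs (blocks.length + 1) 0 [0]
    (cuts.zip cuts.tail).map (fun ab => PySem.List.slice blocks (some ab.1) (some ab.2))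

-- ===== PRECONDITION & SPEC =====
-- Pre_ excludes (a) max_size ≤ 0 with blocks longer than max_size, where A's while loop never
-- terminates (except blocks = [] with max_size < 0, where A returns [] but B's cut loop diverges —
-- see claim cites), and (b) block lists longer than max_size containing a block without a "type"
-- key, where A (and B) raise KeyError.
def Pre_chunk_at_dividers_py (blocks : List (List (String × String))) (max_size : Int) : Prop :=
  (blocks.length : Int) ≤ max_size ∨ (1 ≤ max_size ∧ ∀ b ∈ blocks, (pvTypeOf b).isSome)
instance (blocks : List (List (String × String))) (max_size : Int) : Decidable (Pre_chunk_at_dividers_py blocks max_size) := by unfold Pre_chunk_at_dividers_py; infer_instance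

def pvWitness_chunk_at_dividers_py : (List (List (String × String))) × Int :=
  ([[("type", "section")], [("type", "divider")], [("type", "text")]], 2)

def Spec_chunk_at_dividers_py (blocks : List (List (String × String))) (max_size : Int) (out : List (List (List (String × String)))) : Prop := out = chunk_at_dividers_py_alt blocks max_size
instance (blocks : List (List (String × String))) (max_size : Int) (out : List (List (List (String × String)))) : Decidable (Spec_chunk_at_dividers_py blocks max_size out) := by unfold Spec_chunk_at_dividers_py; infer_instance

-- ===== CLAIM (what is proved, stated in full; the proofs are below) =====
def Claim_equal_chunk_at_dividers_py : Prop := ∀ (blocks : List (List (String × String))) (max_size : Int), Dom_chunk_at_dividers_py blocks max_size → Pre_chunk_at_dividers_py blocks max_size → Spec_chunk_at_dividers_py blocks max_size (chunk_at_dividers_py blocks max_size)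

-- ===== LEMMAS AND PROOFS =====

theorem pvAFind_eq_head (rds : List Int) (start e : Int) :
    pvAFind rds start e = ((rds.filter (fun p => decide (start < p ∧ p ≤ e))).head?).map (· + 1) := by
  induction rds with
  | nil => rfl
  | cons p rest ih =>
    by_cases h : start < p ∧ p ≤ e
    · simp [pvAFind, h]
    · simp [pvAFind, h, ih]

theorem pvAFind_reverse_eq (l : List Int) (start e : Int) :
    pvAFind l.reverse start e = ((l.filter (fun p => decide (start < p ∧ p ≤ e))).getLast?).map (· + 1) := by
  rw [pvAFind_eq_head, List.filter_reverse, List.head?_reverse]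

theorem sorted_takeWhile_eq_filter (e : Int) (t : List Int) (ht : t.Pairwise (· ≤ ·)) :
    t.takeWhile (fun d => decide (d ≤ e)) = t.filter (fun d => decide (d ≤ e)) := by
  induction t with
  | nil => rfl
  | cons d rest ih =>
    rcases List.pairwise_cons.mp ht with ⟨hd, hrest⟩
    by_cases h : d ≤ e
    · simp [h, ih hrest]
    · have hnil : rest.filter (fun d => decide (d ≤ e)) = [] := by
        rw [List.filter_eq_nil_iff]; intro x hx
        have := hd x hx; simp; omega
      simp [h, hnil]

theorem filter_gt_getLast (start : Int) (t : List Int) (ht : t.Pairwise (· ≤ ·)) :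
    (t.filter (fun p => decide (start < p))).getLast? =
      match t.getLast? with
      | some l => if start < l then some l else none
      | none => none := by
  induction t using List.reverseRecOn with
  | nil => rfl
  | append_singleton t' a ih =>
    rw [List.pairwise_append] at ht
    by_cases h : start < a
    · simp [List.filter_append, h]
    · have hnil : t'.filter (fun p => decide (start < p)) = [] := by
        rw [List.filter_eq_nil_iff]; intro x hx
        have := ht.2.2 x hx a (by simp); simp; omega
      simp [List.filter_append, h, hnil]

theorem filter_le_length_eq (a : List Int) (x : Int) (k : Nat) (hk : k ≤ a.length)
    (h1 : ∀ (i : Nat), i < k → ∀ v, a[i]? = some v → v ≤ x)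
    (h2 : ∀ (i : Nat), k ≤ i → ∀ v, a[i]? = some v → x < v) :
    (a.filter (fun d => decide (d ≤ x))).length = k := by
  have hsplit : a = a.take k ++ a.drop k := (List.take_append_drop k a).symm
  have htake : (a.take k).filter (fun d => decide (d ≤ x)) = a.take k := by
    apply List.filter_eq_self.mpr
    intro y hy
    rcases List.mem_iff_getElem.mp hy with ⟨i, hi, hyi⟩
    have hil : i < k := lt_of_lt_of_le hi (by simp)
    have hg : a[i]? = some y := by
      rw [List.getElem?_eq_getElem (lt_of_lt_of_le hil hk), ← hyi]
      simp [List.getElem_take]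
    simpa using h1 i hil y hg
  have hdrop : (a.drop k).filter (fun d => decide (d ≤ x)) = [] := by
    apply List.filter_eq_nil_iff.mpr
    intro y hy
    rcases List.mem_iff_getElem.mp hy with ⟨i, hi, hyi⟩
    have hlen : k + i < a.length := by
      have := hi; simp [List.length_drop] at this; omega
    have hg : a[k + i]? = some y := by
      rw [List.getElem?_eq_getElem hlen, ← hyi]
      simp [List.getElem_drop]
    have := h2 (k + i) (by omega) y hg
    simp; omega
  conv_lhs => rw [hsplit]
  rw [List.filter_append, htake, hdrop, List.append_nil, List.length_take]
  omega

theorem pvBr_go (a : List Int) (ha : a.Pairwise (· ≤ ·)) (x : Int) :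
    ∀ (fuel : Nat) (lo hi : Int), 0 ≤ lo → lo ≤ hi → hi ≤ (a.length : Int) →
      (hi - lo).toNat ≤ fuel →
      (∀ (i : Nat), (i : Int) < lo → ∀ v, a[i]? = some v → v ≤ x) →
      (∀ (i : Nat), hi ≤ (i : Int) → ∀ v, a[i]? = some v → x < v) →
      pvBr a x fuel lo hi = ((a.filter (fun d => decide (d ≤ x))).length : Int) := by
  have hget : ∀ (i j : Nat) (hij : i ≤ j) (hj : j < a.length), a[i]'(Nat.lt_of_le_of_lt hij hj) ≤ a[j] := by
    intro i j hij hj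
    rcases Nat.eq_or_lt_of_le hij with h | h
    · subst h; exact le_refl _
    · exact List.pairwise_iff_getElem.mp ha i j (Nat.lt_of_lt_of_le h (le_of_lt hj)) hj h
  intro fuel
  induction fuel with
  | zero =>
    intro lo hi h0 hlh hhl hf h1 h2
    have heq : lo = hi := by omega
    subst heq
    show lo = _
    have : (a.filter (fun d => decide (d ≤ x))).length = lo.toNat :=
      filter_le_length_eq a x lo.toNat (by omega)
        (fun i hi v hv => h1 i (by omega) v hv)
        (fun i hi v hv => h2 i (by omega) v hv)
    omega
  | succ f ih =>
    intro lo hi h0 hlh hhl hf h1 h2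
    by_cases hlt : lo < hi
    case neg =>
      have heq : lo = hi := by omega
      subst heq
      simp only [pvBr, if_neg hlt]
      have : (a.filter (fun d => decide (d ≤ x))).length = lo.toNat :=
        filter_le_length_eq a x lo.toNat (by omega)
          (fun i hi v hv => h1 i (by omega) v hv)
          (fun i hi v hv => h2 i (by omega) v hv)
      omega
    case pos =>
      have hmidb := PySem.Int.floordiv_two_mid_bounds (le_of_lt hlt)
      set mid := PySem.Int.floordiv (lo + hi) 2 with hmid
      have hmlt : mid < hi := by
        rw [hmid, PySem.Int.floordiv_lt_iff_lt_mul (by omega)]; omega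
      have hmge : lo ≤ mid := hmidb.1
      have hmn : mid = ((mid.toNat : Nat) : Int) := by omega
      have hmlen : mid.toNat < a.length := by omega
      have hgv : PySem.List.pyGet? a mid = some (a[mid.toNat]) := by
        conv_lhs => rw [hmn]
        rw [PySem.List.pyGet?_natCast, List.getElem?_eq_getElem hmlen]
      simp only [pvBr, if_pos hlt, ← hmid, hgv, Option.getD_some]
      by_cases hvx : a[mid.toNat] ≤ x
      · rw [if_pos hvx]
        apply ih (mid + 1) hi (by omega) (by omega) hhl (by omega)
        · intro i hilt v hv
          have hia : i < a.length := by
            by_contra hcon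
            rw [List.getElem?_eq_none (by omega)] at hv; simp at hv
          rw [List.getElem?_eq_getElem hia] at hv
          injection hv with hv'
          have hle : a[i]'(Nat.lt_of_le_of_lt (by omega) hmlen) ≤ a[mid.toNat] := hget i mid.toNat (by omega) hmlen
          omega
        · exact h2
      · rw [if_neg hvx]
        apply ih lo mid h0 (by omega) (by omega) (by omega) h1
        · intro i hige v hv
          have hia : i < a.length := by
            by_contra hcon
            rw [List.getElem?_eq_none (by omega)] at hv; simp at hv
          rw [List.getElem?_eq_getElem hia] at hv
          injection hv with hv'
          have hle : a[mid.toNat]'(Nat.lt_of_le_of_lt (by omega) hia) ≤ a[i] := hget mid.toNat i (by omega) hia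
          omega

-- the per-chunk split position: A's reverse scan = B's bisect_right step
theorem split_eq (divs : List Int) (hs : divs.Pairwise (· ≤ ·)) (s m : Int) (h0 : 0 ≤ s) :
    (match pvAFind divs.reverse s (s + m) with | some v => v | none => s + m) =
      (let j := pvBr divs (s + m) (divs.length + 1) 0 (divs.length : Int)
       let p := if 0 < j then (PySem.List.pyGet? divs (j - 1)).getD (-1) else -1
       if s < p then p + 1 else s + m) := by
  have hj : pvBr divs (s + m) (divs.length + 1) 0 (divs.length : Int)
      = ((divs.filter (fun d => decide (d ≤ s + m))).length : Int) :=
    pvBr_go divs hs (s + m) _ 0 _ (le_refl 0) (by omega) (le_refl _) (by omega)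
      (by intro i hi v hv; omega)
      (by intro i hi v hv; rw [List.getElem?_eq_none (by omega)] at hv; simp at hv)
  simp only []
  set F := divs.filter (fun d => decide (d ≤ s + m)) with hF
  have hFs : F.Pairwise (· ≤ ·) := hs.filter _
  have hfilt : divs.filter (fun p => decide (s < p ∧ p ≤ s + m)) = F.filter (fun p => decide (s < p)) := by
    rw [hF, List.filter_filter]
    congr 1; funext p; simp [Bool.and_comm, and_comm]
  rw [pvAFind_reverse_eq, hfilt, filter_gt_getLast s F hFs, hj]
  cases hL : F.getLast? with
  | none =>
    have hF0 : F = [] := List.getLast?_eq_none_iff.mp hL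
    rw [hF0]
    simp
    omega
  | some l =>
    have hFne : F ≠ [] := by intro h; rw [h] at hL; simp at hL
    have hjpos : 0 < F.length := List.length_pos_iff.mpr hFne
    have hpref : F <+: divs := by
      rw [hF, ← sorted_takeWhile_eq_filter (s + m) divs hs]
      exact List.takeWhile_prefix _
    have hFlen : F.length ≤ divs.length := hpref.length_le
    have hcast : ((F.length : Int) - 1) = (((F.length - 1 : Nat)) : Int) := by omega
    obtain ⟨t, ht⟩ := hpref
    have hget : PySem.List.pyGet? divs ((F.length : Int) - 1) = some l := by
      rw [hcast, PySem.List.pyGet?_natCast, ← ht,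
          List.getElem?_append_left (by omega), ← List.getLast?_eq_getElem?]
      exact hL
    have hpos : (0 : Int) < (F.length : Int) := by exact_mod_cast hjpos
    simp only [if_pos hpos, hget, Option.getD_some]
    by_cases hsl : s < l
    · simp [hsl]
    · simp [hsl]

theorem pvCuts_acc (n m : Int) (d : List Int) :
    ∀ (fuel : Nat) (s : Int) (cuts : List Int),
      pvCuts n m d fuel s cuts = cuts ++ pvCuts n m d fuel s [] := by
  intro fuel
  induction fuel with
  | zero => intro s cuts; simp [pvCuts]
  | succ f ih =>
    intro s cuts
    simp only [pvCuts]
    split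
    · rw [ih _ (cuts ++ [_]), ih _ ([] ++ [_])]
      simp
    · split <;> simp

theorem slice_to_length (l : List (List (String × String))) (s : Int) (h0 : 0 ≤ s) :
    PySem.List.slice l (some s) (some (l.length : Int)) = PySem.List.slice l (some s) none := by
  obtain ⟨k, rfl⟩ : ∃ k : Nat, s = (k : Int) := ⟨s.toNat, by omega⟩
  rw [PySem.List.slice_natCast, PySem.List.slice_from_natCast]
  exact List.take_of_length_le (by simp)

-- the split position always lands in (s, s+m+1]
theorem split_mem_bounds (divs : List Int) (s m : Int) (hm : 1 ≤ m) :
    s < (match pvAFind divs.reverse s (s + m) with | some v => v | none => s + m) ∧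
      (match pvAFind divs.reverse s (s + m) with | some v => v | none => s + m) ≤ s + m + 1 := by
  cases hfa : pvAFind divs.reverse s (s + m) with
  | none => simp; omega
  | some v =>
    rw [pvAFind_reverse_eq] at hfa
    rcases Option.map_eq_some_iff.mp hfa with ⟨l, hl, hv⟩
    have hmem : l ∈ divs.filter (fun p => decide (s < p ∧ p ≤ s + m)) :=
      List.mem_of_getLast? hl
    rcases List.mem_filter.mp hmem with ⟨-, hcond⟩
    simp at hcond
    simp
    omega

theorem loop_eq (blocks : List (List (String × String))) (m : Int) (hm : 1 ≤ m)
    (divs : List Int) (hs : divs.Pairwise (· ≤ ·)) :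
    ∀ (fuel : Nat) (s : Int) (chunks : List (List (List (String × String)))),
      0 ≤ s → s ≤ (blocks.length : Int) → ((blocks.length : Int) - s).toNat < fuel →
      pvALoop blocks divs m fuel s chunks =
        chunks ++ ((pvCuts (blocks.length : Int) m divs fuel s [s]).zip
                     (pvCuts (blocks.length : Int) m divs fuel s [s]).tail).map
                    (fun ab => PySem.List.slice blocks (some ab.1) (some ab.2)) := by
  intro fuel
  induction fuel with
  | zero => intro s chunks h0 hsn hf; exact absurd hf (by omega)
  | succ f ih =>
    intro s chunks h0 hsn hf
    by_cases hml : m < (blocks.length : Int) - s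
    case pos =>
      have hsn' : s < (blocks.length : Int) := by omega
      have hnle : ¬ ((blocks.length : Int) ≤ s + m) := by omega
      have heqs := split_eq divs hs s m h0
      simp only [] at heqs
      set sp := (if s < (if 0 < pvBr divs (s + m) (divs.length + 1) 0 (divs.length : Int) then
            (PySem.List.pyGet? divs (pvBr divs (s + m) (divs.length + 1) 0 (divs.length : Int) - 1)).getD (-1)
          else -1) then
          (if 0 < pvBr divs (s + m) (divs.length + 1) 0 (divs.length : Int) then
            (PySem.List.pyGet? divs (pvBr divs (s + m) (divs.length + 1) 0 (divs.length : Int) - 1)).getD (-1)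
          else -1) + 1
        else s + m) with hsp
      have hb := split_mem_bounds divs s m hm
      rw [heqs] at hb
      -- A one step
      rw [show pvALoop blocks divs m (f + 1) s chunks
            = pvALoop blocks divs m f sp (chunks ++ [PySem.List.slice blocks (some s) (some sp)]) by
          simp only [pvALoop, if_pos hsn', if_neg hnle, heqs, hsp]]
      -- B one step
      rw [show pvCuts (blocks.length : Int) m divs (f + 1) s [s]
            = pvCuts (blocks.length : Int) m divs f sp ([s] ++ [sp]) by
          simp only [pvCuts, if_pos hml, hsp]]
      rw [pvCuts_acc _ _ _ f sp ([s] ++ [sp])]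
      rw [ih sp (chunks ++ [PySem.List.slice blocks (some s) (some sp)]) (by omega) (by omega) (by omega)]
      rw [pvCuts_acc _ _ _ f sp [sp]]
      simp [List.zip_cons_cons]
    case neg =>
      have hge : (blocks.length : Int) ≤ s + m := by omega
      by_cases hsn' : s < (blocks.length : Int)
      · rw [show pvCuts (blocks.length : Int) m divs (f + 1) s [s] = [s, (blocks.length : Int)] by
            simp [pvCuts, hml, hsn']]
        simp only [pvALoop, if_pos hsn', if_pos hge]
        simp [List.zip_cons_cons, slice_to_length blocks s h0]
      · rw [show pvCuts (blocks.length : Int) m divs (f + 1) s [s] = [s] by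
            simp [pvCuts, hml, hsn']]
        simp [pvALoop, hsn']

-- divider positions come out of enumerate in nondecreasing order
theorem divs_sorted (blocks : List (List (String × String))) :
    (((PySem.List.enumerate blocks 0).filter (fun ib => pvTypeOf ib.2 == some "divider")).map (·.1)).Pairwise (· ≤ ·) := by
  rw [List.pairwise_map]
  exact (((PySem.List.pairwise_lt_enumerate blocks 0).filter _)).imp (fun h => le_of_lt h)

-- ===== VERDICT (by name: the statement is the Claim_ definition above) =====
theorem chunk_at_dividers_py_spec : Claim_equal_chunk_at_dividers_py := by
  intro blocks max_size _ hpre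
  unfold Spec_chunk_at_dividers_py chunk_at_dividers_py chunk_at_dividers_py_alt
  split
  case isTrue => rfl
  case isFalse h =>
    have hm : 1 ≤ max_size := by
      rcases hpre with h1 | h2
      · exact absurd h1 h
      · exact h2.1
    rw [loop_eq blocks max_size hm _ (divs_sorted blocks) (blocks.length + 1) 0 [] (le_refl 0) (by omega) (by omega)]
    simp
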